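-- pv_equiv track=rewrite | github.com/rodrigo-rac2/hackerrank-py | Nested Lists/nestedlists.py | get_second_lowest_score_student_name
-- ===== SOURCE A (Python) =====
-- def find_second_lowest_grade(ordered_grades):
--     lowest_grade = min(ordered_grades)
--     for i in range(len(ordered_grades)):
--         if ordered_grades[i] > lowest_grade:
--             return ordered_grades[i]
--
-- def get_second_lowest_score_student_name(records):
--     second_lowest_score_list = []
--     sorted_records = dict(sorted(records.items(), key=lambda x: x[1], reverse=False))
--     sorted_records_list = list(sorted_records.items())
--     second_lowest_grade = find_second_lowest_grade(list(sorted_records.values()))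
--     for i in range(len(sorted_records_list)):
--         if sorted_records_list[i][1] == second_lowest_grade:
--             second_lowest_score_list.append(sorted_records_list[i][0])
--     return sorted(second_lowest_score_list)
-- ===== SOURCE B (Python) =====
-- def get_second_lowest_score_student_name(records):
--     lowest = None
--     second = None
--     for g in records.values():
--         if lowest is None or g < lowest:
--             if lowest is not None:
--                 second = lowest
--             lowest = g
--         elif g != lowest and (second is None or g < second):
--             second = g
--     if second is None:
--         return []
--     return sorted(name for name, g in records.items() if g == second)
-- ===== Notes on version B (the rewrite author's own statement) =====
-- stated objective: faster
-- what changed: B replaces A's full sort of all records by grade (plus a dict rebuild) with a single linear scan that tracks the lowest and second-lowest distinct grade, then sorts only the matching names.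
-- outside the precondition, e.g. on get_second_lowest_score_student_name({}): A raises ValueError, B returns []
import Mathlib
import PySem

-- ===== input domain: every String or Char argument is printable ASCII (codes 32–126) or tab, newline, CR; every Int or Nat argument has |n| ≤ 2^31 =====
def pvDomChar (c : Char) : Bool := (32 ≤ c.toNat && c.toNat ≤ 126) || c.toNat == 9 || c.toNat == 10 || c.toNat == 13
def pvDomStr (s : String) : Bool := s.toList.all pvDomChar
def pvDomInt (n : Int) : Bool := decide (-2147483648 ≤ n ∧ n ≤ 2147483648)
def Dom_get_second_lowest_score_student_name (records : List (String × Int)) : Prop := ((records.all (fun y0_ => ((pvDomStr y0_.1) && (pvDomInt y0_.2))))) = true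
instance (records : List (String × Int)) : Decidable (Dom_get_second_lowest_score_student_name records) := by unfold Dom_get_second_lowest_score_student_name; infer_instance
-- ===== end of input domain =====

-- ===== PORT A =====
-- B recomputes the second-lowest grade in one linear scan instead of A's sort of all records; the final name sort runs over matches only.
def pv_find_second_lowest_grade (ordered_grades : List Int) : Option Int :=
  match PySem.List.min? ordered_grades (fun x => x) with
  | none => none      -- min([]) raises ValueError in Python; Pre_ excludes the empty dict
  | some lowest_grade => ordered_grades.find? (fun g => decide (lowest_grade < g))

def get_second_lowest_score_student_name (records : List (String × Int)) : List String :=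
  let sorted_records : PySem.Dict String Int :=
    PySem.Dict.ofList (PySem.List.sorted records (fun x => x.2) false)
  let sorted_records_list := sorted_records.items
  let second_lowest_grade := pv_find_second_lowest_grade sorted_records.values
  let second_lowest_score_list := sorted_records_list.foldl
    (fun acc p => if some p.2 == second_lowest_grade then acc ++ [p.1] else acc) []
  PySem.List.sorted second_lowest_score_list (fun x => x) false

-- ===== PORT B =====
-- one step of B's scan: state = (lowest grade so far, second-lowest distinct grade so far)
def pvScanMins (st : Option Int × Option Int) (g : Int) : Option Int × Option Int :=
  match st.1 with
  | none => (some g, st.2)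
  | some lowest =>
    if g < lowest then (some g, some lowest)
    else if g ≠ lowest then
      match st.2 with
      | none => (st.1, some g)
      | some second => if g < second then (st.1, some g) else st
    else st

def get_second_lowest_score_student_name_alt (records : List (String × Int)) : List String :=
  match (records.foldl (fun st p => pvScanMins st p.2) (none, none)).2 with
  | none => []
  | some second =>
    PySem.List.sorted ((records.filter (fun p => p.2 == second)).map (fun p => p.1))
      (fun x => x) false

-- ===== PRECONDITION & SPEC =====
-- Pre_ excludes the empty dict (min([]) makes A raise ValueError) and association lists with
-- duplicate keys, which are not the image of any Python dict (dict() collapses duplicates).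
def Pre_get_second_lowest_score_student_name (records : List (String × Int)) : Prop :=
  records ≠ [] ∧ (records.map Prod.fst).Nodup
instance (records : List (String × Int)) : Decidable (Pre_get_second_lowest_score_student_name records) := by unfold Pre_get_second_lowest_score_student_name; infer_instance
def pvWitness_get_second_lowest_score_student_name : (List (String × Int)) := [("alice", 3), ("bob", 1), ("carol", 3)]

def Spec_get_second_lowest_score_student_name (records : List (String × Int)) (out : List String) : Prop := out = get_second_lowest_score_student_name_alt records
instance (records : List (String × Int)) (out : List String) : Decidable (Spec_get_second_lowest_score_student_name records out) := by unfold Spec_get_second_lowest_score_student_name; infer_instance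

-- ===== CLAIM (what is proved, stated in full; the proofs are below) =====
def Claim_equal_get_second_lowest_score_student_name : Prop := ∀ (records : List (String × Int)), Dom_get_second_lowest_score_student_name records → Pre_get_second_lowest_score_student_name records → Spec_get_second_lowest_score_student_name records (get_second_lowest_score_student_name records)

-- ===== LEMMAS AND PROOFS =====

-- what an Option Int must be to be "the second-lowest distinct grade" of gs, given the minimum lo
def pvSecondSpec (gs : List Int) (lo : Int) (o : Option Int) : Prop :=
  match o with
  | none => ∀ g ∈ gs, ¬ lo < g
  | some s => s ∈ gs ∧ lo < s ∧ ∀ g ∈ gs, lo < g → s ≤ g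

-- invariant of B's scan: the state is exactly (min of grades seen, second-lowest distinct grade seen)
def pvStateSpec (gs : List Int) (st : Option Int × Option Int) : Prop :=
  match st with
  | (none, none) => gs = []
  | (none, some _) => False
  | (some lo, so) => lo ∈ gs ∧ (∀ g ∈ gs, lo ≤ g) ∧ pvSecondSpec gs lo so

lemma pvSecondSpec_unique {gs : List Int} {lo : Int} {o₁ o₂ : Option Int}
    (h₁ : pvSecondSpec gs lo o₁) (h₂ : pvSecondSpec gs lo o₂) : o₁ = o₂ := by
  match o₁, o₂ with
  | none, none => rfl
  | none, some s => exact absurd h₂.2.1 (h₁ s h₂.1)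
  | some s, none => exact absurd h₁.2.1 (h₂ s h₁.1)
  | some s, some t =>
    have hst := h₁.2.2 t h₂.1 h₂.2.1
    have hts := h₂.2.2 s h₁.1 h₁.2.1
    simp only [Option.some.injEq]; omega

lemma pvSecondSpec_perm {gs gs' : List Int} (hp : gs.Perm gs') {lo : Int} {o : Option Int}
    (h : pvSecondSpec gs lo o) : pvSecondSpec gs' lo o := by
  match o with
  | none => exact fun g hg => h g (hp.mem_iff.mpr hg)
  | some s => exact ⟨hp.mem_iff.mp h.1, h.2.1, fun g hg => h.2.2 g (hp.mem_iff.mpr hg)⟩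

lemma pvStateSpec_step {gs : List Int} {st : Option Int × Option Int} (g : Int)
    (h : pvStateSpec gs st) : pvStateSpec (gs ++ [g]) (pvScanMins st g) := by
  obtain ⟨o₁, o₂⟩ := st
  match o₁, o₂ with
  | none, some s => exact h.elim
  | none, none =>
    have hgs : gs = [] := h
    subst hgs
    simp [pvScanMins, pvStateSpec, pvSecondSpec]
  | some lo, none =>
    obtain ⟨hmem, hmin, hsec⟩ := h
    simp only [pvSecondSpec] at hsec
    by_cases h1 : g < lo
    · have e : pvScanMins (some lo, none) g = (some g, some lo) := by simp [pvScanMins, h1]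
      rw [e]
      refine ⟨by simp, ?_, by simp [hmem], h1, ?_⟩
      · intro x hx; rcases List.mem_append.mp hx with hx | hx
        · have := hmin x hx; omega
        · simp at hx; omega
      · intro x hx hlt; rcases List.mem_append.mp hx with hx | hx
        · exact hmin x hx
        · simp at hx; omega
    · by_cases h2 : g = lo
      · subst h2
        have e : pvScanMins (some g, none) g = (some g, none) := by simp [pvScanMins]
        rw [e]
        refine ⟨by simp [hmem], ?_, ?_⟩
        · intro x hx; rcases List.mem_append.mp hx with hx | hx
          · exact hmin x hx
          · simp at hx; omega
        · intro x hx; rcases List.mem_append.mp hx with hx | hx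
          · exact hsec x hx
          · simp at hx; omega
      · have e : pvScanMins (some lo, none) g = (some lo, some g) := by
          simp [pvScanMins, h1, h2]
        rw [e]
        have hglo : lo < g := by
          rcases lt_trichotomy g lo with h' | h' | h' <;> simp_all
        refine ⟨by simp [hmem], ?_, by simp, hglo, ?_⟩
        · intro x hx; rcases List.mem_append.mp hx with hx | hx
          · exact hmin x hx
          · simp at hx; omega
        · intro x hx hlt; rcases List.mem_append.mp hx with hx | hx
          · exact absurd hlt (hsec x hx)
          · simp at hx; omega
  | some lo, some s =>
    obtain ⟨hmem, hmin, hs⟩ := h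
    obtain ⟨hsmem, hlos, hsmin⟩ := hs
    by_cases h1 : g < lo
    · have e : pvScanMins (some lo, some s) g = (some g, some lo) := by simp [pvScanMins, h1]
      rw [e]
      refine ⟨by simp, ?_, by simp [hmem], h1, ?_⟩
      · intro x hx; rcases List.mem_append.mp hx with hx | hx
        · have := hmin x hx; omega
        · simp at hx; omega
      · intro x hx hlt; rcases List.mem_append.mp hx with hx | hx
        · exact hmin x hx
        · simp at hx; omega
    · by_cases h2 : g = lo
      · subst h2
        have e : pvScanMins (some g, some s) g = (some g, some s) := by simp [pvScanMins]
        rw [e]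
        refine ⟨by simp [hmem], ?_, by simp [hsmem], hlos, ?_⟩
        · intro x hx; rcases List.mem_append.mp hx with hx | hx
          · exact hmin x hx
          · simp at hx; omega
        · intro x hx hlt; rcases List.mem_append.mp hx with hx | hx
          · exact hsmin x hx hlt
          · simp at hx; omega
      · have hglo : lo < g := by
          rcases lt_trichotomy g lo with h' | h' | h' <;> simp_all
        by_cases h3 : g < s
        · have e : pvScanMins (some lo, some s) g = (some lo, some g) := by
            simp [pvScanMins, h1, h2, h3]
          rw [e]
          refine ⟨by simp [hmem], ?_, by simp, hglo, ?_⟩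
          · intro x hx; rcases List.mem_append.mp hx with hx | hx
            · exact hmin x hx
            · simp at hx; omega
          · intro x hx hlt; rcases List.mem_append.mp hx with hx | hx
            · have := hsmin x hx hlt; omega
            · simp at hx; omega
        · have e : pvScanMins (some lo, some s) g = (some lo, some s) := by
            simp [pvScanMins, h1, h2, h3]
          rw [e]
          refine ⟨by simp [hmem], ?_, by simp [hsmem], hlos, ?_⟩
          · intro x hx; rcases List.mem_append.mp hx with hx | hx
            · exact hmin x hx
            · simp at hx; omega
          · intro x hx hlt; rcases List.mem_append.mp hx with hx | hx
            · exact hsmin x hx hlt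
            · simp at hx; omega

lemma pvStateSpec_foldl : ∀ (l gs : List Int) (st : Option Int × Option Int),
    pvStateSpec gs st → pvStateSpec (gs ++ l) (l.foldl pvScanMins st) := by
  intro l
  induction l with
  | nil => intro gs st h; simpa using h
  | cons x t ih =>
    intro gs st h
    have := ih (gs ++ [x]) (pvScanMins st x) (pvStateSpec_step x h)
    simpa using this

lemma pv_find?_min_of_sorted : ∀ (vs : List Int), vs.Pairwise (· ≤ ·) →
    ∀ (lo f : Int), vs.find? (fun g => decide (lo < g)) = some f →
    ∀ g ∈ vs, lo < g → f ≤ g := by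
  intro vs
  induction vs with
  | nil => intro _ lo f hf; simp at hf
  | cons x t ih =>
    intro hp lo f hf g hg hlt
    rw [List.pairwise_cons] at hp
    by_cases hx : lo < x
    · rw [List.find?_cons_of_pos (h := by simpa using hx)] at hf
      have : f = x := by simpa using hf.symm
      subst this
      rcases List.mem_cons.mp hg with rfl | hg
      · exact le_refl _
      · exact hp.1 g hg
    · rw [List.find?_cons_of_neg (h := by simpa using hx)] at hf
      rcases List.mem_cons.mp hg with rfl | hg
      · exact absurd hlt hx
      · exact ih hp.2 lo f hf g hg hlt

lemma pv_find?_secondSpec (vs : List Int) (hp : vs.Pairwise (· ≤ ·)) (lo : Int) :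
    pvSecondSpec vs lo (vs.find? (fun g => decide (lo < g))) := by
  cases hf : vs.find? (fun g => decide (lo < g)) with
  | none =>
    intro g hg
    have := List.find?_eq_none.mp hf g hg
    simpa using this
  | some f =>
    refine ⟨List.mem_of_find?_eq_some hf, by simpa using List.find?_some hf,
      pv_find?_min_of_sorted vs hp lo f hf⟩

lemma pv_items_ofList (l : List (String × Int)) (h : (l.map Prod.fst).Nodup) :
    (PySem.Dict.ofList l).items = l := by
  have := PySem.Dict.items_foldl_insert_fresh l Prod.fst Prod.snd PySem.Dict.empty
    (by intro a _; simp [PySem.Dict.contains_empty]) h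
  simpa [PySem.Dict.ofList, PySem.Dict.update] using this

lemma pv_main : ∀ (records : List (String × Int)), records ≠ [] → (records.map Prod.fst).Nodup →
    get_second_lowest_score_student_name records = get_second_lowest_score_student_name_alt records := by
  intro records hne hnd
  set si := PySem.List.sorted records (fun x => x.2) false with hsi
  have hperm : si.Perm records := PySem.List.sorted_perm records (fun x => x.2) false
  have hnd' : (si.map Prod.fst).Nodup := ((hperm.map Prod.fst).nodup_iff).mpr hnd
  have hitems : (PySem.Dict.ofList si).items = si := pv_items_ofList si hnd'
  set vs := si.map Prod.snd with hvs
  set gs := records.map Prod.snd with hgs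
  have hvsperm : vs.Perm gs := hperm.map Prod.snd
  have hvsne : vs ≠ [] := by
    simp only [hvs, ne_eq, List.map_eq_nil_iff]
    rw [hsi, PySem.List.sorted_eq_nil_iff]; exact hne
  have hpw : vs.Pairwise (· ≤ ·) := by
    have := PySem.List.sorted_pairwise records (fun x => x.2)
    rw [hvs, hsi]
    exact List.pairwise_map.mpr this
  -- min of vs
  obtain ⟨lo, hlo⟩ : ∃ lo, PySem.List.min? vs (fun x => x) = some lo := by
    cases h : PySem.List.min? vs (fun x => x) with
    | none =>
      cases hv : vs with
      | nil => exact absurd hv hvsne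
      | cons a t =>
        rw [hv, PySem.List.min?_id_cons] at h
        exact absurd h (by simp)
    | some m => exact ⟨m, rfl⟩
  have hlomem : lo ∈ vs := PySem.List.min?_mem hlo
  have hlomin : ∀ y ∈ vs, lo ≤ y := by
    intro y hy; exact PySem.List.min?_isMin hlo y hy
  -- A's second-lowest option
  have hAspec : pvSecondSpec vs lo (pv_find_second_lowest_grade vs) := by
    unfold pv_find_second_lowest_grade
    rw [hlo]
    exact pv_find?_secondSpec vs hpw lo
  -- B's scan
  set stB := records.foldl (fun st p => pvScanMins st p.2) (none, none) with hstB
  have hfold : gs.foldl pvScanMins (none, none) = stB := by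
    rw [hgs, hstB, List.foldl_map]
  have hstate : pvStateSpec gs stB := by
    rw [← hfold]
    have := pvStateSpec_foldl gs [] (none, none) (by simp [pvStateSpec])
    simpa using this
  obtain ⟨loB, soB, hst⟩ : ∃ loB soB, stB = (some loB, soB) := by
    match h : stB with
    | (none, none) =>
      have : gs = [] := hstate
      rw [hgs] at this
      simp only [List.map_eq_nil_iff] at this
      exact absurd this hne
    | (none, some s) => exact hstate.elim
    | (some l, so) => exact ⟨l, so, rfl⟩
  rw [hst] at hstate
  obtain ⟨hBmem, hBmin, hBspec⟩ := hstate
  have hlo_eq : loB = lo := by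
    have h1 : lo ≤ loB := hlomin loB (hvsperm.mem_iff.mpr hBmem)
    have h2 : loB ≤ lo := hBmin lo (hvsperm.mem_iff.mp hlomem)
    omega
  subst hlo_eq
  have hBspec' : pvSecondSpec vs loB soB := pvSecondSpec_perm hvsperm.symm hBspec
  have hoeq : pv_find_second_lowest_grade vs = soB := pvSecondSpec_unique hAspec hBspec'
  -- assemble
  have hvals : (PySem.Dict.ofList si).values = vs := by
    rw [PySem.Dict.values, hitems]
  have hA : get_second_lowest_score_student_name records =
      PySem.List.sorted ((PySem.Dict.ofList si).items.foldl
        (fun acc p => if some p.2 == pv_find_second_lowest_grade ((PySem.Dict.ofList si).values)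
          then acc ++ [p.1] else acc) [])
        (fun x => x) false := rfl
  have hB : get_second_lowest_score_student_name_alt records =
      match stB.2 with
      | none => []
      | some second =>
        PySem.List.sorted ((records.filter (fun p => p.2 == second)).map (fun p => p.1))
          (fun x => x) false := rfl
  rw [hA, hB, hvals, hitems, hoeq, hst]
  rw [PySem.List.foldl_append_if (p := fun p => some p.2 == soB) (f := Prod.fst)]
  cases soB with
  | none =>
    simp only [List.nil_append]
    have : si.filter (fun p => some p.2 == (none : Option Int)) = [] := by simp
    rw [this]
    simp [PySem.List.sorted_eq_nil_iff]
  | some s =>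
    simp only [List.nil_append]
    have hfp : (si.filter (fun p => some p.2 == some s)).Perm
        (records.filter (fun p => p.2 == s)) := by
      have h1 := hperm.filter (fun p => (p.2 : Int) == s)
      have h2 : (fun (p : String × Int) => some p.2 == some s) = (fun p => p.2 == s) := by
        funext p; simp
      rw [h2]
      exact h1
    have := PySem.List.sorted_eq_sorted_of_perm
      ((si.filter (fun p => some p.2 == some s)).map Prod.fst)
      ((records.filter (fun p => p.2 == s)).map Prod.fst)
      (fun x => x) (fun a b h => h) (hfp.map Prod.fst)
    exact this

-- ===== VERDICT (by name: the statement is the Claim_ definition above) =====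
theorem get_second_lowest_score_student_name_spec : Claim_equal_get_second_lowest_score_student_name := by
  intro records _ hpre
  exact pv_main records hpre.1 hpre.2
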